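-- pv_equiv track=rewrite | github.com/jechen97/dsbc | myfunctions.py | poly_mult
-- ===== SOURCE A (Python) =====
-- def leftshift(tuple=[]):
--     """Shift the elements in array 1 spot left and takes first element to last"""
--
--     a_0 = tuple[0]
--     for i in range(len(tuple) - 1):
--         tuple[i] = tuple[i + 1]
--     tuple[len(tuple) - 1] = a_0
--     return tuple
--
-- def mysum(n=[]):  # quicker than python sum
--     """Calculate sum of array"""
--
--     a = 0
--     for i in range(len(n)):
--         a += n[i]
--     return a
--
-- def poly_mult(f=[], g=[]):
--     """Polynomial multiplication in F_2[x]
--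
--     :param f,g: arrays where f[0] is coefficient for x^{n-1}, f[n-1] coefficient for x^0
--     """
--     n = len(f)
--     matrix = [[0 for x in range(n)] for y in range(n)]  # n is length of tuple/polynomial degree
--
--     for i in range(n):
--         for j in range(n):
--             matrix[i][j] = f[j] * g[n - 1 - i]
--         for k in range(i):
--             leftshift(matrix[i])
--
--     fg = [0] * n
--
--     for i in range(n):
--         if mysum([row[i] for row in matrix]) % 2 == 0:
--             fg[i] = 0
--         else:
--             fg[i] = 1
--
--     if mysum(fg) == len(fg) - 1 and fg[len(fg) - 1] == 0:
--         fg = [0] * (len(fg) - 1)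
--         fg.append(1)
--
--     return fg
-- ===== SOURCE B (Python) =====
-- def poly_mult(f=[], g=[]):
--     """Circular polynomial multiplication in F_2[x]: direct O(n^2) convolution,
--     no shift matrix; same all-ones fixup as the original."""
--     n = len(f)
--     fg = [sum(f[(i + r) % n] * g[n - 1 - r] for r in range(n)) % 2 for i in range(n)]
--     if sum(fg) == n - 1 and fg[-1] == 0:
--         return [0] * (n - 1) + [1]
--     return fg
-- ===== Notes on version B (the rewrite author's own statement) =====
-- stated objective: faster
-- what changed: B computes each output coefficient directly as a circular-convolution sum mod 2, eliminating A's n-by-n shift matrix built with repeated O(n) leftshift rotations.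
import Mathlib
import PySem

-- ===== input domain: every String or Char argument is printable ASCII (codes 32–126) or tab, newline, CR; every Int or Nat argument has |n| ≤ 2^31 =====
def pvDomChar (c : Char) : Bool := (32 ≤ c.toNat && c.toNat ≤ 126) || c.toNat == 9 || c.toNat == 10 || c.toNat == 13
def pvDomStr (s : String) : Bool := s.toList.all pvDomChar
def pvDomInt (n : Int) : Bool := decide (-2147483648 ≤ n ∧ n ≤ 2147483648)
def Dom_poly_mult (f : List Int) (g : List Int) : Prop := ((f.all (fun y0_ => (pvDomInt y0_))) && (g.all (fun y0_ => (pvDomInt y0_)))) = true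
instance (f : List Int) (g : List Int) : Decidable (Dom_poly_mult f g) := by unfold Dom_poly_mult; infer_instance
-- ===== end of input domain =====

-- B replaces A's n×n shift-matrix construction by a direct circular-convolution sum mod 2 (asymptotically faster).

-- ===== PORT A =====
-- leftshift: Python rotates the list in place via the index loop; ported as the same
-- fold of in-place writes (t[0] read via getD: Python raises on [], unreachable under Pre_).
def leftshift (t : List Int) : List Int :=
  let a0 := t.getD 0 0
  let t' := (List.range (t.length - 1)).foldl (fun acc i => acc.set i (acc.getD (i+1) 0)) t
  t'.set (t.length - 1) a0

def mysum (l : List Int) : Int :=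
  (List.range l.length).foldl (fun a i => a + l.getD i 0) 0

-- Python mutates matrix row by row; iteration i touches only row i, so the i-loop is a map
-- producing each row (inner j-loop = fold of writes; the k-loop = fold applying leftshift).
-- g index n-1-i is in range under Pre_ (getD is exact there).
def poly_mult (f : List Int) (g : List Int) : List Int :=
  let n := f.length
  let matrix := (List.range n).map (fun i =>
    let row := (List.range n).foldl
      (fun r j => r.set j (f.getD j 0 * g.getD (n - 1 - i) 0)) (List.replicate n 0)
    (List.range i).foldl (fun r _ => leftshift r) row)
  let fg := (List.range n).foldl
    (fun fg i =>
      if PySem.Int.mod (mysum (matrix.map (fun row => row.getD i 0))) 2 = 0 then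
        fg.set i 0
      else
        fg.set i 1)
    (List.replicate n (0 : Int))
  if mysum fg = (fg.length : Int) - 1 ∧ fg.getD (fg.length - 1) 0 = 0 then
    List.replicate (fg.length - 1) 0 ++ [1]
  else fg

-- ===== PORT B =====
def poly_mult_alt (f : List Int) (g : List Int) : List Int :=
  let n := f.length
  let fg := (List.range n).map (fun i =>
    PySem.Int.mod
      ((List.range n).foldl (fun a r => a + f.getD ((i + r) % n) 0 * g.getD (n - 1 - r) 0) 0) 2)
  if fg.sum = (n : Int) - 1 ∧ fg.getD (n - 1) 0 = 0 then
    List.replicate (n - 1) 0 ++ [1]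
  else fg

-- ===== PRECONDITION & SPEC =====
-- Pre_ excludes exactly the inputs where A raises IndexError (g shorter than f: g[n-1-i] out of range).
def Pre_poly_mult (f : List Int) (g : List Int) : Prop := f.length ≤ g.length
instance (f : List Int) (g : List Int) : Decidable (Pre_poly_mult f g) := by unfold Pre_poly_mult; infer_instance
def pvWitness_poly_mult : List Int × List Int := ([1, 0, 1], [0, 1, 1])

def Spec_poly_mult (f : List Int) (g : List Int) (out : List Int) : Prop := out = poly_mult_alt f g
instance (f : List Int) (g : List Int) (out : List Int) : Decidable (Spec_poly_mult f g out) := by unfold Spec_poly_mult; infer_instance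

-- ===== CLAIM (what is proved, stated in full; the proofs are below) =====
def Claim_equal_poly_mult : Prop := ∀ (f : List Int) (g : List Int), Dom_poly_mult f g → Pre_poly_mult f g → Spec_poly_mult f g (poly_mult f g)

-- ===== LEMMAS AND PROOFS =====

-- setting position j to w j for j = 0..k-1 rewrites the prefix
theorem foldl_set_map_aux (w : Nat → Int) (k : Nat) (l : List Int) (hk : k ≤ l.length) :
    (List.range k).foldl (fun r j => r.set j (w j)) l
      = (List.range k).map w ++ l.drop k := by
  induction k with
  | zero => simp
  | succ k ih =>
    rw [List.range_succ, List.foldl_append, List.map_append,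
        ih (Nat.le_of_succ_le hk)]
    simp only [List.foldl_cons, List.foldl_nil]
    have hlen : ((List.range k).map w).length = k := by simp
    have hdrop : l.drop k = l[k] :: l.drop (k + 1) :=
      List.drop_eq_getElem_cons (by omega)
    rw [List.set_append, hlen, if_neg (lt_irrefl k), Nat.sub_self, hdrop,
        List.set_cons_zero]
    simp

theorem foldl_set_map (w : Nat → Int) (l : List Int) :
    (List.range l.length).foldl (fun r j => r.set j (w j)) l
      = (List.range l.length).map w := by
  rw [foldl_set_map_aux w l.length l le_rfl]
  simp

-- invariant of leftshift's shifting loop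
theorem leftshift_loop (k : Nat) (l : List Int) (hk : k + 1 ≤ l.length) :
    (List.range k).foldl (fun acc i => acc.set i (acc.getD (i+1) 0)) l
      = (l.drop 1).take k ++ l.drop k := by
  induction k with
  | zero => simp
  | succ k ih =>
    rw [List.range_succ, List.foldl_append, ih (by omega)]
    simp only [List.foldl_cons, List.foldl_nil]
    have h1 : k + 1 < l.length := hk
    have hlen : ((l.drop 1).take k).length = k := by
      simp; omega
    have hdropk : l.drop k = l[k] :: l.drop (k + 1) :=
      List.drop_eq_getElem_cons (by omega)
    have hdropk1 : l.drop (k+1) = l[k+1] :: l.drop (k + 2) :=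
      List.drop_eq_getElem_cons (by omega)
    have hget : (((l.drop 1).take k ++ l.drop k).getD (k+1) 0) = l[k+1] := by
      rw [List.getD_eq_getElem?_getD, List.getElem?_append_right (by omega), hlen,
          hdropk, hdropk1]
      simp [List.getElem?_eq_getElem h1]
    have htake : (l.drop 1).take (k+1) = (l.drop 1).take k ++ [l[k+1]] := by
      rw [List.take_add_one]
      congr 1
      have hg : (l.drop 1)[k]? = some l[k+1] := by
        rw [List.getElem?_drop]
        have e : 1 + k = k + 1 := by omega
        rw [e, List.getElem?_eq_getElem (by omega : k + 1 < l.length)]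
      rw [hg]
      simp
    rw [hget, List.set_append, hlen, if_neg (lt_irrefl k), Nat.sub_self, hdropk,
        List.set_cons_zero, htake]
    simp

theorem leftshift_cons (a : Int) (t : List Int) :
    leftshift (a :: t) = t ++ [a] := by
  unfold leftshift
  simp only [List.length_cons, Nat.add_sub_cancel, List.getD_cons_zero]
  rw [leftshift_loop t.length (a :: t) (by simp)]
  have hdrop : (a :: t).drop t.length = [(a :: t)[t.length]] := by
    rw [List.drop_eq_getElem_cons (by simp)]
    simp
  rw [hdrop, List.drop_one, List.tail_cons, List.take_length, List.set_append,
      if_neg (lt_irrefl t.length), Nat.sub_self, List.set_cons_zero]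

theorem range_map_succ_shift (n : Nat) (u : Nat → Int) :
    (List.range (n+1)).map u = u 0 :: (List.range n).map (fun j => u (j+1)) := by
  rw [List.range_succ_eq_map]
  simp [Function.comp]

-- one leftshift on a row that is a map over range rotates the index
theorem leftshift_map_range (n : Nat) (hn : 0 < n) (u : Nat → Int) :
    leftshift ((List.range n).map u)
      = (List.range n).map (fun j => u ((j + 1) % n)) := by
  obtain ⟨m, rfl⟩ : ∃ m, n = m + 1 := ⟨n - 1, by omega⟩
  rw [range_map_succ_shift m u, leftshift_cons, List.range_succ, List.map_append]
  congr 1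
  · apply List.map_congr_left
    intro j hj
    rw [List.mem_range] at hj
    rw [Nat.mod_eq_of_lt (by omega)]
  · simp

theorem iterate_leftshift (n : Nat) (hn : 0 < n) (i : Nat) (u : Nat → Int) :
    (List.range i).foldl (fun r _ => leftshift r) ((List.range n).map u)
      = (List.range n).map (fun j => u ((j + i) % n)) := by
  induction i with
  | zero =>
    simp only [List.range_zero, List.foldl_nil]
    apply List.map_congr_left
    intro j hj
    rw [List.mem_range] at hj
    rw [Nat.add_zero, Nat.mod_eq_of_lt hj]
  | succ i ih =>
    rw [List.range_succ, List.foldl_append]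
    simp only [List.foldl_cons, List.foldl_nil]
    rw [ih, leftshift_map_range n hn]
    apply List.map_congr_left
    intro j hj
    rw [List.mem_range] at hj
    have h1 : ((j + 1) % n + i) % n = ((j + 1) + i) % n :=
      (Nat.mod_modEq (j + 1) n).add_right i
    rw [h1]
    have h2 : j + 1 + i = j + (i + 1) := by omega
    rw [h2]

-- foldl-sum over range equals the list sum of the mapped range
theorem foldl_sum_range (n : Nat) (w : Nat → Int) (a : Int) :
    (List.range n).foldl (fun a i => a + w i) a = a + ((List.range n).map w).sum := by
  induction n generalizing a with
  | zero => simp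
  | succ n ih =>
    rw [List.range_succ, List.foldl_append, List.map_append, ih]
    simp [add_assoc]

theorem map_getD_range (l : List Int) :
    (List.range l.length).map (fun i => l.getD i 0) = l := by
  apply List.ext_getElem
  · simp
  · intro i h1 h2
    simp [List.getD_eq_getElem?_getD, List.getElem?_eq_getElem h2]

theorem mysum_eq_sum (l : List Int) : mysum l = l.sum := by
  unfold mysum
  rw [foldl_sum_range, map_getD_range]
  simp

theorem pymod_two (x : Int) : PySem.Int.mod x 2 = 0 ∨ PySem.Int.mod x 2 = 1 := by
  rw [PySem.Int.mod_eq_emod_of_pos (by norm_num : (0:Int) < 2)]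
  omega

theorem foldl_ifset_eq_map (n : Nat) (c : Nat → Prop) [DecidablePred c] :
    (List.range n).foldl (fun fg i => if c i then fg.set i 0 else fg.set i (1:Int))
        (List.replicate n 0)
      = (List.range n).map (fun i => if c i then 0 else 1) := by
  have hfun : (fun (fg : List Int) i => if c i then fg.set i 0 else fg.set i 1)
      = fun (fg : List Int) i => fg.set i (if c i then 0 else 1) := by
    funext fg i
    split <;> rfl
  rw [hfun]
  have h := foldl_set_map (fun i => if c i then (0:Int) else 1) (List.replicate n (0:Int))
  simpa using h

theorem poly_mult_eq (f g : List Int) :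
    poly_mult f g = poly_mult_alt f g := by
  simp only [poly_mult, poly_mult_alt]
  set n := f.length with hn
  -- characterize the matrix rows: row i, built then leftshifted i times
  have hrow : ∀ i, (List.range i).foldl (fun r _ => leftshift r)
        ((List.range n).foldl
          (fun r j => r.set j (f.getD j 0 * g.getD (n - 1 - i) 0)) (List.replicate n 0))
      = (List.range n).map (fun j => f.getD ((j + i) % n) 0 * g.getD (n - 1 - i) 0) := by
    intro i
    by_cases hn0 : 0 < n
    · have hinit := foldl_set_map (fun j => f.getD j 0 * g.getD (n - 1 - i) 0)
        (List.replicate n (0 : Int))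
      simp only [List.length_replicate] at hinit
      rw [hinit, iterate_leftshift n hn0 i]
    · have hz : n = 0 := by omega
      rw [hz]
      have hls : leftshift ([] : List Int) = [] := by
        unfold leftshift
        simp
      have hfold : ∀ L : List Nat, L.foldl (fun r _ => leftshift r) ([] : List Int) = [] := by
        intro L
        induction L with
        | nil => rfl
        | cons a L ihL => simp [List.foldl_cons, hls, ihL]
      simp [hfold]
  simp only [hrow]
  have hcol : ∀ i, i < n →
      mysum (List.map (fun row => row.getD i 0)
        (List.map (fun r => List.map (fun j => f.getD ((j + r) % n) 0 * g.getD (n - 1 - r) 0)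
          (List.range n)) (List.range n)))
      = (List.range n).foldl (fun a r => a + f.getD ((i + r) % n) 0 * g.getD (n - 1 - r) 0) 0 := by
    intro i hi
    rw [mysum_eq_sum, foldl_sum_range]
    simp only [zero_add]
    congr 1
    rw [List.map_map]
    apply List.map_congr_left
    intro r hr
    simp only [Function.comp_apply]
    rw [List.getD_eq_getElem?_getD, List.getElem?_map,
        List.getElem?_range hi]
    simp
  rw [foldl_ifset_eq_map n (fun i =>
      PySem.Int.mod (mysum (List.map (fun row => row.getD i 0)
        (List.map (fun r => List.map (fun j => f.getD ((j + r) % n) 0 * g.getD (n - 1 - r) 0)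
          (List.range n)) (List.range n)))) 2 = 0)]
  have hlist : (List.range n).map (fun i =>
      if PySem.Int.mod (mysum (List.map (fun row => row.getD i 0)
        (List.map (fun r => List.map (fun j => f.getD ((j + r) % n) 0 * g.getD (n - 1 - r) 0)
          (List.range n)) (List.range n)))) 2 = 0 then (0:Int) else 1)
      = (List.range n).map (fun i =>
        PySem.Int.mod
          ((List.range n).foldl (fun a r => a + f.getD ((i + r) % n) 0 * g.getD (n - 1 - r) 0) 0) 2) := by
    apply List.map_congr_left
    intro i hi
    rw [List.mem_range] at hi
    rw [hcol i hi]
    rcases pymod_two ((List.range n).foldl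
        (fun a r => a + f.getD ((i + r) % n) 0 * g.getD (n - 1 - r) 0) 0) with h | h
    · rw [if_pos h, h]
    · rw [if_neg (by rw [h]; norm_num), h]
  rw [hlist, mysum_eq_sum]
  simp

-- ===== VERDICT (by name: the statement is the Claim_ definition above) =====
theorem poly_mult_spec : Claim_equal_poly_mult := by
  intro f g _ _
  unfold Spec_poly_mult
  exact poly_mult_eq f g
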